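-- pv_equiv track=rewrite | github.com/scallop722/tournament_generator | tournament_generator.py | split_participants
-- ===== SOURCE A (Python) =====
-- from typing import List, Tuple
--
-- def split_participants(participants: List[str]) -> List[List[str]]:
--     """参加者を適切なテーブル数に分割"""
--     total = len(participants)
--
--     if total <= 6:
--         # 6人以下は1テーブル
--         return [participants]
--     elif total <= 12:
--         # 7-12人は2テーブル
--         mid = total // 2
--         return [participants[:mid], participants[mid:]]
--     elif total <= 18:
--         # 13-18人は3テーブル
--         third = total // 3
--         remainder = total % 3
--
--         tables = []
--         start = 0
--         for i in range(3):
--             # 余りを最初のテーブルに分散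
--             size = third + (1 if i < remainder else 0)
--             tables.append(participants[start:start + size])
--             start += size
--
--         return tables
--     else:
--         # 19-24人は4テーブル
--         fourth = total // 4
--         remainder = total % 4
--
--         tables = []
--         start = 0
--         for i in range(4):
--             # 余りを最初のテーブルに分散
--             size = fourth + (1 if i < remainder else 0)
--             tables.append(participants[start:start + size])
--             start += size
--
--         return tables
-- ===== SOURCE B (Python) =====
-- def split_participants(participants):
--     """Recursive greedy chunking: repeatedly cut off ceil(remaining/tables_left)
--     participants; the table count is found by incremental search, not a branch ladder."""
--     def deal(rest, k):
--         if k == 1: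
--             return [rest]
--         head = -(-len(rest) // k)  # ceil of the remaining load
--         return [rest[:head]] + deal(rest[head:], k - 1)
--
--     k = 1
--     while k < 4 and 6 * k < len(participants):
--         k += 1
--     return deal(participants, k)
-- ===== Notes on version B (the rewrite author's own statement) =====
-- stated objective: alternative
-- what changed: Replaces A's four branches with precomputed size tables (base=total//n, remainder spread via an indexed loop over slice offsets) by recursive greedy chunking: the table count is found by an incremental while-search and the list is split by repeatedly cutting off ceil(remaining/tables_left) participants, with no size/offset bookkeeping.
-- intended difference: On lists of odd length 7, 9 or 11 A puts the extra participant on the SECOND table ([total//2, total-total//2]) although its own comments and its 3- and 4-table branches distribute remainders to the first tables; B uniformly gives the first table the extra participant, which is the intended remainder-first rule. — e.g. on split_participants(["a", "b", "c", "d", "e", "f", "g"]): A returns [["a", "b", "c"], ["d", "e", "f", "g"]], B returns [["a", "b", "c", "d"], ["e", "f", "g"]]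
import Mathlib
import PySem

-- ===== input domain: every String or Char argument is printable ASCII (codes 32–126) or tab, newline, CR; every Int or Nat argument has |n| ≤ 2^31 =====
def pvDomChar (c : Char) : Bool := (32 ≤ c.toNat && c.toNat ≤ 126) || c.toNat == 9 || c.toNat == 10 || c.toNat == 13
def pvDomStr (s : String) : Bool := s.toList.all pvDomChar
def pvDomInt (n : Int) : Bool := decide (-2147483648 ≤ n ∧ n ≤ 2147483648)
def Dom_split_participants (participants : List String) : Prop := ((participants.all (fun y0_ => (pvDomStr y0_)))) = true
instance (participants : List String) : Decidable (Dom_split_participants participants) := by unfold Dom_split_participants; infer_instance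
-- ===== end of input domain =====

-- B replaces A's four hand-written branches by recursive greedy chunking (cut off ceil(remaining/tables_left)
-- each step; table count found by incremental search); on odd lengths 7/9/11 B fixes A's inconsistent 2-table split (see D_).


-- ===== PORT A =====
def split_participants (participants : List String) : List (List String) :=
  let total : Int := PySem.List.len participants
  if total ≤ 6 then
    [participants]
  else if total ≤ 12 then
    let mid := PySem.Int.floordiv total 2
    [PySem.List.slice participants none (some mid), PySem.List.slice participants (some mid) none]
  else if total ≤ 18 then
    let third := PySem.Int.floordiv total 3
    let remainder := PySem.Int.mod total 3
    ((PySem.List.pyRange 0 3 1).foldl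
      (fun (acc : List (List String) × Int) i =>
        let size := third + (if i < remainder then (1 : Int) else 0)
        (acc.1 ++ [PySem.List.slice participants (some acc.2) (some (acc.2 + size))], acc.2 + size))
      ([], 0)).1
  else
    let fourth := PySem.Int.floordiv total 4
    let remainder := PySem.Int.mod total 4
    ((PySem.List.pyRange 0 4 1).foldl
      (fun (acc : List (List String) × Int) i =>
        let size := fourth + (if i < remainder then (1 : Int) else 0)
        (acc.1 ++ [PySem.List.slice participants (some acc.2) (some (acc.2 + size))], acc.2 + size))
      ([], 0)).1

-- ===== PORT B =====
-- deal(rest, k): python's recursive helper; k is always ≥ 1 at every call (it starts as bFindK _ 1 ≥ 1),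
-- so the total guard 'k ≤ 1' coincides with python's 'k == 1' on every reachable call.
def bDeal (rest : List String) (k : Int) : List (List String) :=
  if k ≤ 1 then [rest]
  else
    let head := -(PySem.Int.floordiv (-(PySem.List.len rest)) k)
    PySem.List.slice rest none (some head) :: bDeal (PySem.List.slice rest (some head) none) (k - 1)
termination_by k.toNat
decreasing_by omega

-- the 'while k < 4 and 6*k < len(participants): k += 1' loop
def bFindK (total k : Int) : Int :=
  if k < 4 ∧ 6 * k < total then bFindK total (k + 1) else k
termination_by (4 - k).toNat
decreasing_by omega

def split_participants_alt (participants : List String) : List (List String) :=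
  bDeal participants (bFindK (PySem.List.len participants) 1)

-- ===== PRECONDITION & SPEC =====
-- On lists of odd length 7, 9 or 11 A puts the extra participant on the SECOND table although its own
-- comments and its 3- and 4-table branches give remainders to the FIRST tables; B uniformly gives the
-- first table the extra participant, the intended remainder-first rule.
def D_split_participants (participants : List String) : Prop :=
  7 ≤ participants.length ∧ participants.length ≤ 12 ∧ participants.length % 2 = 1
instance (participants : List String) : Decidable (D_split_participants participants) := by
  unfold D_split_participants; infer_instance

def Spec_split_participants (participants : List String) (out : List (List String)) : Prop :=
  ¬ D_split_participants participants → out = split_participants_alt participants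
instance (participants : List String) (out : List (List String)) : Decidable (Spec_split_participants participants out) := by
  unfold Spec_split_participants; infer_instance

def pvDiffWitness_split_participants : List String := ["a", "b", "c", "d", "e", "f", "g"]
def pvDiffWitnessOut_split_participants : (List (List String)) × (List (List String)) :=
  ([["a", "b", "c"], ["d", "e", "f", "g"]], [["a", "b", "c", "d"], ["e", "f", "g"]])

-- ===== CLAIM (what is proved, stated in full; the proofs are below) =====
def Claim_unchanged_split_participants : Prop := ∀ (participants : List String), Dom_split_participants participants → Spec_split_participants participants (split_participants participants)
def Claim_changed_split_participants : Prop := Dom_split_participants (pvDiffWitness_split_participants) ∧ D_split_participants (pvDiffWitness_split_participants) ∧ split_participants (pvDiffWitness_split_participants) = pvDiffWitnessOut_split_participants.1 ∧ split_participants_alt (pvDiffWitness_split_participants) = pvDiffWitnessOut_split_participants.2 ∧ pvDiffWitnessOut_split_participants.1 ≠ pvDiffWitnessOut_split_participants.2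
def Claim_exact_split_participants : Prop := ∀ (participants : List String), Dom_split_participants participants → D_split_participants participants → split_participants participants ≠ split_participants_alt participants

-- ===== LEMMAS AND PROOFS =====

theorem ceil2 (m : ℕ) : -(PySem.Int.floordiv (-(m:Int)) 2) = (((m+1)/2 : ℕ) : Int) := by
  rw [PySem.Int.neg_floordiv_neg_eq_iff_of_pos (by omega)]
  constructor <;> push_cast <;> omega

theorem ceil3 (m : ℕ) : -(PySem.Int.floordiv (-(m:Int)) 3) = (((m+2)/3 : ℕ) : Int) := by
  rw [PySem.Int.neg_floordiv_neg_eq_iff_of_pos (by omega)]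
  constructor <;> push_cast <;> omega

theorem ceil4 (m : ℕ) : -(PySem.Int.floordiv (-(m:Int)) 4) = (((m+3)/4 : ℕ) : Int) := by
  rw [PySem.Int.neg_floordiv_neg_eq_iff_of_pos (by omega)]
  constructor <;> push_cast <;> omega

theorem bDeal_one (rest : List String) : bDeal rest 1 = [rest] := by
  rw [bDeal]; norm_num

theorem bDeal_two (rest : List String) :
    bDeal rest 2 = [rest.take ((rest.length+1)/2), rest.drop ((rest.length+1)/2)] := by
  rw [bDeal, if_neg (by omega)]
  simp only [PySem.List.len_eq, ceil2, PySem.List.slice_to_natCast, PySem.List.slice_from_natCast]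
  rw [show (2:Int) - 1 = 1 from rfl, bDeal_one]

theorem bDeal_three (rest : List String) :
    bDeal rest 3 = rest.take ((rest.length+2)/3) :: bDeal (rest.drop ((rest.length+2)/3)) 2 := by
  rw [bDeal, if_neg (by omega)]
  simp only [PySem.List.len_eq, ceil3, PySem.List.slice_to_natCast, PySem.List.slice_from_natCast]
  norm_num

theorem bDeal_four (rest : List String) :
    bDeal rest 4 = rest.take ((rest.length+3)/4) :: bDeal (rest.drop ((rest.length+3)/4)) 3 := by
  rw [bDeal, if_neg (by omega)]
  simp only [PySem.List.len_eq, ceil4, PySem.List.slice_to_natCast, PySem.List.slice_from_natCast]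
  norm_num

theorem bFindK_one {L : Int} (h : L ≤ 6) : bFindK L 1 = 1 := by
  rw [bFindK, if_neg (by omega)]

theorem bFindK_two {L : Int} (h : 6 < L) (h2 : L ≤ 12) : bFindK L 1 = 2 := by
  rw [bFindK, if_pos ⟨by omega, by omega⟩, bFindK, if_neg (by omega)]; norm_num

theorem bFindK_three {L : Int} (h : 12 < L) (h2 : L ≤ 18) : bFindK L 1 = 3 := by
  rw [bFindK, if_pos ⟨by omega, by omega⟩, bFindK, if_pos ⟨by omega, by omega⟩, bFindK, if_neg (by omega)]; norm_num

theorem bFindK_four {L : Int} (h : 18 < L) : bFindK L 1 = 4 := by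
  rw [bFindK, if_pos ⟨by omega, by omega⟩, bFindK, if_pos ⟨by omega, by omega⟩,
      bFindK, if_pos ⟨by omega, by omega⟩, bFindK, if_neg (by omega)]; norm_num

theorem agree_outside (ps : List String) (hD : ¬ (7 ≤ ps.length ∧ ps.length ≤ 12 ∧ ps.length % 2 = 1)) :
    split_participants ps = split_participants_alt ps := by
  unfold split_participants split_participants_alt
  simp only [PySem.List.len_eq]
  by_cases h6 : ps.length ≤ 6
  · rw [if_pos (by omega : (ps.length:Int) ≤ 6), bFindK_one (by omega), bDeal_one]
  · by_cases h12 : ps.length ≤ 12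
    · -- 2 tables, even length
      have hev : ps.length % 2 = 0 := by omega
      rw [if_neg (by omega : ¬ ((ps.length:Int) ≤ 6)), if_pos (by omega : (ps.length:Int) ≤ 12),
          bFindK_two (by omega) (by omega), bDeal_two]
      have hmid : PySem.Int.floordiv (ps.length:Int) 2 = ((ps.length / 2 : ℕ) : Int) := by
        rw [PySem.Int.floordiv_eq_ediv_of_pos (by omega)]; omega
      rw [hmid, PySem.List.slice_to_natCast, PySem.List.slice_from_natCast]
      have : (ps.length + 1) / 2 = ps.length / 2 := by omega
      rw [this]
    · by_cases h18 : ps.length ≤ 18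
      · -- 3 tables
        rw [if_neg (by omega : ¬ ((ps.length:Int) ≤ 6)), if_neg (by omega : ¬ ((ps.length:Int) ≤ 12)),
            if_pos (by omega : (ps.length:Int) ≤ 18),
            bFindK_three (by omega) (by omega), bDeal_three, bDeal_two]
        rw [show PySem.List.pyRange (0:Int) 3 1 = [0, 1, 2] from by decide]
        simp only [List.foldl, List.length_drop]
        have hthird : PySem.Int.floordiv (ps.length:Int) 3 = ((ps.length / 3 : ℕ) : Int) := by
          rw [PySem.Int.floordiv_eq_ediv_of_pos (by omega)]; omega
        have hmod : PySem.Int.mod (ps.length:Int) 3 = ((ps.length % 3 : ℕ) : Int) := by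
          rw [PySem.Int.mod_eq_emod_of_pos (by omega)]; omega
        simp only [hthird, hmod]
        have hr3 : ps.length % 3 = 0 ∨ ps.length % 3 = 1 ∨ ps.length % 3 = 2 := by omega
        rcases hr3 with hr | hr | hr <;>
        · simp only [hr]
          norm_num
          norm_cast
          refine ⟨?_, ?_, ?_⟩
          · rw [PySem.List.slice_to_natCast]; congr 1; omega
          · rw [PySem.List.slice_natCast]
            congr 1
            · omega
            · congr 1
              omega
          · rw [PySem.List.slice_natCast]
            rw [List.take_of_length_le (by simp; omega)]
            congr 1
            omega
      · -- 4 tables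
        rw [if_neg (by omega : ¬ ((ps.length:Int) ≤ 6)), if_neg (by omega : ¬ ((ps.length:Int) ≤ 12)),
            if_neg (by omega : ¬ ((ps.length:Int) ≤ 18)),
            bFindK_four (by omega), bDeal_four, bDeal_three, bDeal_two]
        rw [show PySem.List.pyRange (0:Int) 4 1 = [0, 1, 2, 3] from by decide]
        simp only [List.foldl, List.length_drop]
        have hfourth : PySem.Int.floordiv (ps.length:Int) 4 = ((ps.length / 4 : ℕ) : Int) := by
          rw [PySem.Int.floordiv_eq_ediv_of_pos (by omega)]; omega
        have hmod : PySem.Int.mod (ps.length:Int) 4 = ((ps.length % 4 : ℕ) : Int) := by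
          rw [PySem.Int.mod_eq_emod_of_pos (by omega)]; omega
        simp only [hfourth, hmod]
        have hr4 : ps.length % 4 = 0 ∨ ps.length % 4 = 1 ∨ ps.length % 4 = 2 ∨ ps.length % 4 = 3 := by omega
        rcases hr4 with hr | hr | hr | hr <;>
        · simp only [hr]
          norm_num
          norm_cast
          refine ⟨?_, ?_, ?_, ?_⟩
          · rw [PySem.List.slice_to_natCast]; congr 1; omega
          · rw [PySem.List.slice_natCast]
            congr 1
            · omega
            · congr 1
              omega
          · rw [PySem.List.slice_natCast]
            congr 1
            · omega
            · congr 1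
              omega
          · rw [PySem.List.slice_natCast]
            rw [List.take_of_length_le (by simp; omega)]
            congr 1
            omega

theorem differ_inside (ps : List String) (hD : 7 ≤ ps.length ∧ ps.length ≤ 12 ∧ ps.length % 2 = 1) :
    split_participants ps ≠ split_participants_alt ps := by
  obtain ⟨h7, h12, hodd⟩ := hD
  unfold split_participants split_participants_alt
  simp only [PySem.List.len_eq]
  rw [if_neg (by omega : ¬ ((ps.length:Int) ≤ 6)), if_pos (by omega : (ps.length:Int) ≤ 12),
      bFindK_two (by omega) (by omega), bDeal_two]
  have hmid : PySem.Int.floordiv (ps.length:Int) 2 = ((ps.length / 2 : ℕ) : Int) := by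
    rw [PySem.Int.floordiv_eq_ediv_of_pos (by omega)]; omega
  rw [hmid, PySem.List.slice_to_natCast, PySem.List.slice_from_natCast]
  intro heq
  simp only [List.cons.injEq] at heq
  have := congrArg List.length heq.1
  simp only [List.length_take] at this
  omega

-- ===== VERDICT (by name: the statement is the Claim_ definition above) =====
theorem split_participants_spec : Claim_unchanged_split_participants := by
  intro ps _ hnD
  exact agree_outside ps (by unfold D_split_participants at hnD; exact hnD)
theorem split_participants_changed : Claim_changed_split_participants := by
  unfold Claim_changed_split_participants
  refine ⟨by decide, by decide, by decide, ?_, by decide⟩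
  show split_participants_alt pvDiffWitness_split_participants = pvDiffWitnessOut_split_participants.2
  unfold split_participants_alt
  rw [show PySem.List.len pvDiffWitness_split_participants = 7 from by decide,
      bFindK_two (by norm_num) (by norm_num), bDeal_two]
  decide
theorem split_participants_tight : Claim_exact_split_participants := by
  intro ps _ hD
  exact differ_inside ps (by unfold D_split_participants at hD; exact hD)
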